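-- pv_equiv track=rewrite | github.com/ysndr/codejam-2019 | round-1/a.py | has_four_at
-- ===== SOURCE A (Python) =====
-- def get_digit(number, n):
--     if 10**n > number:
--         return -1
--     else:
--         return number // 10**n % 10
--
-- def has_four_at(number):
--     fours_idx = []
--     d = 0
--
--     digit = get_digit(number, d)
--     while digit != -1:
--         if digit == 4:
--             fours_idx.append(d)
--         d += 1
--         digit = get_digit(number, d)
--
--     return fours_idx
-- ===== SOURCE B (Python) =====
-- def has_four_at(number):
--     return [i for i, c in enumerate(reversed(str(number))) if c == '4']
-- ===== Notes on version B (the rewrite author's own statement) =====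
-- stated objective: idiomatic
-- what changed: Replaces A's arithmetic digit extraction (10**d powers with floor division and modulo in a while loop) by a single comprehension over the reversed decimal string of the number.
-- outside the precondition, e.g. on has_four_at(-44): A returns [], B returns [0, 1]
import Mathlib
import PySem

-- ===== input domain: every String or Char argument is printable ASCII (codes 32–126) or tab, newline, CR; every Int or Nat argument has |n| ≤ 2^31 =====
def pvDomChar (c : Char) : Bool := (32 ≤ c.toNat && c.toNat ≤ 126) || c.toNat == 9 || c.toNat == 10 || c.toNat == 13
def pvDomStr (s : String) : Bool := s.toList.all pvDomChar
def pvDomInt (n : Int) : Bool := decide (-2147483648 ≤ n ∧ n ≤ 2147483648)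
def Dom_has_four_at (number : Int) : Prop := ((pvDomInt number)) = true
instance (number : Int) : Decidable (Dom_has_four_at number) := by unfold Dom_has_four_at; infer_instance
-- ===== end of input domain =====

-- B replaces A's arithmetic digit extraction (10**d, //, %) by a comprehension over the reversed decimal string.


-- ===== PORT A =====
def get_digit (number : Int) (n : Nat) : Int :=
  if (10 : Int) ^ n > number then -1
  else PySem.Int.mod (PySem.Int.floordiv number ((10 : Int) ^ n)) 10

-- the while loop of A; `fuel` only makes the recursion structural (it never runs out on admitted inputs)
def hasFourLoop (number : Int) : Nat → Nat → List Int → List Int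
  | 0, _, acc => acc
  | fuel + 1, d, acc =>
    let digit := get_digit number d
    if digit = -1 then acc
    else hasFourLoop number fuel (d + 1) (if digit = 4 then acc ++ [(d : Int)] else acc)

def has_four_at (number : Int) : List Int :=
  hasFourLoop number (number.toNat + 1) 0 []

-- ===== PORT B =====
def has_four_at_alt (number : Int) : List Int :=
  (PySem.List.enumerate (PySem.Int.toStr number).toList.reverse 0).filterMap
    (fun p => if p.2 = '4' then some p.1 else none)

-- ===== PRECONDITION & SPEC =====
-- Pre_ excludes negative numbers that contain a four digit: there A returns [] while B reports the
-- positions of '4' in the '-'-prefixed decimal string, and neither corner behaviour is specified.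
def Pre_has_four_at (number : Int) : Prop := 0 ≤ number ∨ 4 ∉ Nat.digits 10 number.natAbs
instance (number : Int) : Decidable (Pre_has_four_at number) := by unfold Pre_has_four_at; infer_instance
def pvWitness_has_four_at : Int := (404)
def Spec_has_four_at (number : Int) (out : List Int) : Prop := out = has_four_at_alt number
instance (number : Int) (out : List Int) : Decidable (Spec_has_four_at number out) := by unfold Spec_has_four_at; infer_instance

-- ===== CLAIM (what is proved, stated in full; the proofs are below) =====
def Claim_equal_has_four_at : Prop := ∀ (number : Int), Dom_has_four_at number → Pre_has_four_at number → Spec_has_four_at number (has_four_at number)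

-- ===== LEMMAS AND PROOFS =====

-- indices (counted from `s`) of fours in a little-endian digit list: the common shape of both ports
def idx4 : List Nat → Int → List Int
  | [], _ => []
  | a :: L, s => (if a = 4 then [s] else []) ++ idx4 L (s + 1)

lemma toDigitsCore_eq (f : Nat) : ∀ (m : Nat) (ds : List Char), 0 < m → m < f →
    Nat.toDigitsCore 10 f m ds = ((Nat.digits 10 m).map Nat.digitChar).reverse ++ ds := by
  induction f with
  | zero => omega
  | succ f ih =>
    intro m ds hm hmf
    rw [Nat.toDigitsCore]
    by_cases h : m / 10 = 0
    · rw [if_pos h, Nat.digits_def' (by norm_num) hm, h]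
      simp
    · rw [if_neg h, ih (m / 10) _ (Nat.pos_of_ne_zero h) (by omega),
        Nat.digits_def' (by norm_num) hm]
      simp

lemma toDigits_reverse (m : Nat) (hm : 0 < m) :
    (Nat.toDigits 10 m).reverse = (Nat.digits 10 m).map Nat.digitChar := by
  rw [Nat.toDigits, toDigitsCore_eq (m + 1) m [] hm (by omega)]
  simp

lemma digitChar_eq_four_iff (a : Nat) (ha : a < 10) : (Nat.digitChar a = '4') ↔ a = 4 := by
  interval_cases a <;> decide

lemma alt_enum (L : List Nat) (hL : ∀ a ∈ L, a < 10) : ∀ (s : Int),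
    (PySem.List.enumerate (L.map Nat.digitChar) s).filterMap
      (fun p => if p.2 = '4' then some p.1 else none) = idx4 L s := by
  induction L with
  | nil => intro s; rfl
  | cons a L ih =>
    intro s
    rw [List.map_cons, PySem.List.enumerate_cons, List.filterMap_cons]
    simp only
    have ha : a < 10 := hL a (by simp)
    by_cases h4 : a = 4
    · rw [if_pos (by rw [digitChar_eq_four_iff a ha]; exact h4)]
      rw [ih (fun x hx => hL x (by simp [hx])) (s + 1)]
      simp [idx4, h4]
    · rw [if_neg (by rw [digitChar_eq_four_iff a ha]; exact h4)]
      rw [ih (fun x hx => hL x (by simp [hx])) (s + 1)]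
      simp [idx4, h4]

lemma idx4_nil_of_not_mem (L : List Nat) (h : 4 ∉ L) : ∀ s, idx4 L s = [] := by
  induction L with
  | nil => intro s; rfl
  | cons a L ih =>
    intro s
    rw [idx4, if_neg (by simp at h; omega), ih (by simp at h; exact h.2) (s + 1)]
    rfl

lemma loop_spec (m : Nat) (hm : 0 < m) : ∀ (fuel d : Nat) (acc : List Int),
    (Nat.digits 10 m).length - d < fuel →
    hasFourLoop (m : Int) fuel d acc = acc ++ idx4 ((Nat.digits 10 m).drop d) (d : Int) := by
  intro fuel
  induction fuel with
  | zero => omega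
  | succ fuel ih =>
    intro d acc hfuel
    rw [hasFourLoop]
    by_cases hd : d < (Nat.digits 10 m).length
    · -- in range: 10^d ≤ m
      have hle : (10 : Nat) ^ d ≤ m := by
        rw [← Nat.le_log_iff_pow_le (by norm_num) (by omega)]
        have := Nat.length_digits 10 m (by norm_num) (by omega)
        omega
      have hcond : ¬ ((10 : Int) ^ d > (m : Int)) := by
        simp only [not_lt]; exact_mod_cast hle
      have hdig : get_digit (m : Int) d = ((m / 10 ^ d % 10 : Nat) : Int) := by
        rw [get_digit, if_neg hcond]
        have h1 : PySem.Int.floordiv (m : Int) ((10 : Int) ^ d) = ((m / 10 ^ d : Nat) : Int) := by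
          have := PySem.Int.floordiv_natCast m (10 ^ d)
          push_cast at this ⊢
          exact this
        rw [h1]
        exact_mod_cast PySem.Int.mod_natCast (m / 10 ^ d) 10
      have hdrop : (Nat.digits 10 m).drop d =
          (Nat.digits 10 m)[d] :: (Nat.digits 10 m).drop (d + 1) :=
        List.drop_eq_getElem_cons hd
      have hget : m / 10 ^ d % 10 = (Nat.digits 10 m)[d] := by
        have h2 : m / 10 ^ d = Nat.ofDigits 10 ((Nat.digits 10 m).drop d) :=
          Nat.self_div_pow_eq_ofDigits_drop d m (by norm_num)
        rw [h2, hdrop, Nat.ofDigits_cons]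
        have hlt : (Nat.digits 10 m)[d] < 10 :=
          Nat.digits_lt_base (by norm_num) (List.getElem_mem hd)
        omega
      have hne : get_digit (m : Int) d ≠ -1 := by rw [hdig]; omega
      rw [if_neg hne]
      rw [ih (d + 1) _ (by omega)]
      rw [hdrop]
      by_cases h4 : (Nat.digits 10 m)[d] = 4
      · have : get_digit (m : Int) d = 4 := by rw [hdig, hget, h4]; rfl
        rw [if_pos this]
        simp [idx4, h4, List.append_assoc]
      · have : get_digit (m : Int) d ≠ 4 := by
          rw [hdig, hget]; exact_mod_cast fun h => h4 (by exact_mod_cast h)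
        rw [if_neg this]
        simp [idx4, h4]
    · -- out of range: 10^d > m
      have : (m : Int) < (10 : Int) ^ d := by
        have h1 : m < 10 ^ (Nat.digits 10 m).length := Nat.lt_base_pow_length_digits (by norm_num)
        have h2 : (10 : Nat) ^ (Nat.digits 10 m).length ≤ 10 ^ d :=
          Nat.pow_le_pow_right (by norm_num) (by omega)
        exact_mod_cast lt_of_lt_of_le h1 h2
      rw [get_digit, if_pos this]
      simp [List.drop_eq_nil_of_le (by omega : (Nat.digits 10 m).length ≤ d), idx4]

-- ===== VERDICT (by name: the statement is the Claim_ definition above) =====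
theorem has_four_at_spec : Claim_equal_has_four_at := by
  intro number _ hpre
  unfold Spec_has_four_at
  by_cases hneg : 0 ≤ number
  case neg =>
    -- negative input admitted by Pre_: its digits contain no 4, both sides return []
    have h4 : 4 ∉ Nat.digits 10 number.natAbs := hpre.resolve_left hneg
    obtain ⟨m, hm, rfl⟩ : ∃ m : Nat, 0 < m ∧ number = -(m : Int) :=
      ⟨number.natAbs, by omega, by omega⟩
    have hA : has_four_at (-(m : Int)) = [] := by
      rw [has_four_at, show (-(m : Int)).toNat + 1 = 1 by omega, hasFourLoop]
      rw [get_digit, if_pos (by simp; omega)]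
    have hB : has_four_at_alt (-(m : Int)) = [] := by
      rw [has_four_at_alt, PySem.Int.toList_toStr, PySem.Int.toChars,
        if_pos (by omega), List.reverse_cons]
      have hm' : (-(m : Int)).natAbs = m := by omega
      rw [hm', toDigits_reverse m hm, PySem.List.enumerate_append, List.filterMap_append]
      rw [alt_enum _ (fun a ha => Nat.digits_lt_base (by norm_num) ha) 0,
        idx4_nil_of_not_mem _ (by rwa [hm'] at h4) 0]
      rfl
    rw [hA, hB]
  obtain ⟨m, rfl⟩ : ∃ m : Nat, number = (m : Int) := ⟨number.toNat, (Int.toNat_of_nonneg hneg).symm⟩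
  rcases Nat.eq_zero_or_pos m with rfl | hm
  · decide
  · have hB : has_four_at_alt (m : Int) = idx4 (Nat.digits 10 m) 0 := by
      rw [has_four_at_alt, PySem.Int.toList_toStr, PySem.Int.toChars]
      rw [if_neg (by omega), Int.toNat_natCast, toDigits_reverse m hm]
      exact alt_enum _ (fun a ha => Nat.digits_lt_base (by norm_num) ha) 0
    have hA : has_four_at (m : Int) = idx4 (Nat.digits 10 m) 0 := by
      rw [has_four_at]
      have hlen : (Nat.digits 10 m).length ≤ m := by
        have := Nat.length_digits 10 m (by norm_num) (by omega)
        have := Nat.log_lt_self 10 (show m ≠ 0 by omega)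
        omega
      have := loop_spec m hm (((m : Int)).toNat + 1) 0 [] (by simp; omega)
      simp only [Int.toNat_natCast] at this
      simpa using this
    rw [hA, hB]
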